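-- pv_equiv track=rewrite | github.com/openakita/openakita | plugins/ppt-maker/ppt_repair.py | _issue_codes_by_slide
-- ===== SOURCE A (Python) =====
-- from typing import Any
--
-- def _issue_codes_by_slide(issues: list[dict[str, Any]]) -> dict[str, set[str]]:
--     out: dict[str, set[str]] = {}
--     for issue in issues:
--         message = str(issue.get("message") or "")
--         slide_id = message.split(" ", 1)[0]
--         if not slide_id:
--             continue
--         out.setdefault(slide_id, set()).add(str(issue.get("code") or ""))
--     return out
-- ===== SOURCE B (Python) =====
-- def _issue_codes_by_slide(issues):
--     rows = []
--     for issue in issues: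
--         slide_id = str(issue.get("message") or "").split(" ", 1)[0]
--         if slide_id:
--             rows.append((slide_id, str(issue.get("code") or "")))
--     return {sid: {c for s, c in rows if s == sid}
--             for sid in dict.fromkeys(s for s, _ in rows)}
-- ===== Notes on version B (the rewrite author's own statement) =====
-- stated objective: alternative
-- what changed: Replaces A's single-pass dict-of-sets accumulation (setdefault+add per issue) with a two-phase pipeline: first extract the (slide_id, code) rows, then build the result in one comprehension that dedups the keys in first-occurrence order and collects each key's codes by filtering the rows.
import Mathlib
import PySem

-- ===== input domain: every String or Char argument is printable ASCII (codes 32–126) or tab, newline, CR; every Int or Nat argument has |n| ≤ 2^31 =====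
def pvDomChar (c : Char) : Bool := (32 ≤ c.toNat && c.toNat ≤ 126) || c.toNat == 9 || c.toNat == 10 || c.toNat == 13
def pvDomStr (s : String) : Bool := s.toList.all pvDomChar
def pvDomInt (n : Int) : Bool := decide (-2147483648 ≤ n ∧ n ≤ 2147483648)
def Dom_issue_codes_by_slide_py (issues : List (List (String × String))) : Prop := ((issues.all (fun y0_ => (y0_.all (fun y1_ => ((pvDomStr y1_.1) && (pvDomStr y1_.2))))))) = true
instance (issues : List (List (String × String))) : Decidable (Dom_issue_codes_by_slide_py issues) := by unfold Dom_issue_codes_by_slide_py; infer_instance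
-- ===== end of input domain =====

-- B replaces A's single-pass hash accumulation by a two-phase pipeline (extract the
-- (slide_id, code) rows first, then group per first-occurrence key); objective: alternative.


-- ===== PORT A =====
-- str(issue.get(k) or ""): values are strings, so 'or ""' only turns a missing key (None) into ""
def pvField (issue : List (String × String)) (k : String) : String :=
  ((PySem.Dict.mk issue).get? k).getD ""

-- message.split(" ", 1)[0]: the separator " " is nonempty (splitMax? is some) and a split
-- result is never empty, so the Python [0] never raises; headD "" is exact here.
def pvSlideId (message : String) : String :=
  ((PySem.Str.splitMax? message " " 1).getD []).headD ""

-- out.setdefault(slide_id, set()).add(code) is Dict.modify slide_id ∅ (·.add code)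
def issue_codes_by_slide_py (issues : List (List (String × String))) : List (String × List String) :=
  (issues.foldl
    (fun (out : PySem.Dict String (PySem.Set String)) issue =>
      let message := pvField issue "message"
      let slide_id := pvSlideId message
      if slide_id = "" then out
      else out.modify slide_id PySem.Set.empty (fun s => PySem.Set.add s (pvField issue "code")))
    PySem.Dict.empty).items

-- ===== PORT B =====
def issue_codes_by_slide_py_alt (issues : List (List (String × String))) : List (String × List String) :=
  let rows := issues.filterMap (fun issue =>
    let slide_id := pvSlideId (pvField issue "message")
    if slide_id = "" then none else some (slide_id, pvField issue "code"))
  (PySem.List.dedup (rows.map Prod.fst)).map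
    (fun sid => (sid, PySem.Set.ofList ((rows.filter (fun p => p.1 == sid)).map Prod.snd)))

-- ===== PRECONDITION & SPEC =====
def Spec_issue_codes_by_slide_py (issues : List (List (String × String))) (out : List (String × List String)) : Prop := out = issue_codes_by_slide_py_alt issues
instance (issues : List (List (String × String))) (out : List (String × List String)) : Decidable (Spec_issue_codes_by_slide_py issues out) := by unfold Spec_issue_codes_by_slide_py; infer_instance

-- ===== CLAIM (what is proved, stated in full; the proofs are below) =====
def Claim_equal_issue_codes_by_slide_py : Prop := ∀ (issues : List (List (String × String))), Dom_issue_codes_by_slide_py issues → Spec_issue_codes_by_slide_py issues (issue_codes_by_slide_py issues)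

-- ===== LEMMAS AND PROOFS =====
-- the grouping fold over extracted rows
def pvStep (d : PySem.Dict String (PySem.Set String)) (p : String × String) : PySem.Dict String (PySem.Set String) :=
  d.modify p.1 PySem.Set.empty (fun s => PySem.Set.add s p.2)

def pvRows (issues : List (List (String × String))) : List (String × String) :=
  issues.filterMap (fun issue =>
    let slide_id := pvSlideId (pvField issue "message")
    if slide_id = "" then none else some (slide_id, pvField issue "code"))

-- A's fold over issues is the grouping fold over the extracted rows
theorem pv_foldA_eq (issues : List (List (String × String))) (d : PySem.Dict String (PySem.Set String)) :
    issues.foldl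
      (fun (out : PySem.Dict String (PySem.Set String)) issue =>
        let message := pvField issue "message"
        let slide_id := pvSlideId message
        if slide_id = "" then out
        else out.modify slide_id PySem.Set.empty (fun s => PySem.Set.add s (pvField issue "code")))
      d
    = (pvRows issues).foldl pvStep d := by
  induction issues generalizing d with
  | nil => rfl
  | cons issue rest ih =>
    simp only [pvRows, List.filterMap_cons, List.foldl_cons]
    by_cases h : pvSlideId (pvField issue "message") = ""
    · simp only [h, if_true]
      exact ih d
    · simp only [if_neg h]
      simpa [pvStep, pvRows] using ih _

-- getD of the grouping fold: first-occurrence dedup of the codes filed under k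
theorem pv_getD_fold (l : List (String × String)) (d : PySem.Dict String (PySem.Set String)) (k : String) :
    (l.foldl pvStep d).getD k PySem.Set.empty
      = PySem.Set.update (d.getD k PySem.Set.empty) ((l.filter (fun p => p.1 == k)).map Prod.snd) := by
  induction l generalizing d with
  | nil => simp [PySem.Set.update]
  | cons p rest ih =>
    simp only [List.foldl_cons, List.filter_cons]
    by_cases h : p.1 = k
    · simp only [h, beq_self_eq_true, if_pos trivial, List.map_cons]
      rw [ih, pvStep, PySem.Dict.getD_modify]
      simp [h, PySem.Set.update]
    · have hb : (p.1 == k) = false := beq_eq_false_iff_ne.mpr h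
      simp only [hb, Bool.false_eq_true, if_false]
      rw [ih, pvStep, PySem.Dict.getD_modify]
      simp [Ne.symm h]

-- an association list with distinct keys is recovered from its keys and lookups
theorem pv_assoc_items (l : List (String × PySem.Set String)) (h : (l.map Prod.fst).Nodup) :
    l = (l.map Prod.fst).map (fun k => (k, (PySem.Dict.mk l).getD k PySem.Set.empty)) := by
  induction l with
  | nil => rfl
  | cons p rest ih =>
    obtain ⟨k, v⟩ := p
    simp only [List.map_cons, List.nodup_cons] at h
    obtain ⟨hk, hnd⟩ := h
    simp only [List.map_cons, List.map_map]
    have hhead : (PySem.Dict.mk ((k, v) :: rest)).getD k PySem.Set.empty = v := by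
      simp [PySem.Dict.getD, PySem.Dict.get?, List.find?]
    rw [hhead]
    congr 1
    have htail : ∀ k' ∈ rest.map Prod.fst,
        (PySem.Dict.mk ((k, v) :: rest)).getD k' PySem.Set.empty
          = (PySem.Dict.mk rest).getD k' PySem.Set.empty := by
      intro k' hk'
      have hne : (k == k') = false := beq_eq_false_iff_ne.mpr (fun he => hk (he ▸ hk'))
      simp [PySem.Dict.getD, PySem.Dict.get?, List.find?, hne]
    conv_lhs => rw [ih hnd]
    rw [List.map_map]
    refine List.map_congr_left (fun p hp => ?_)
    have hk' : p.1 ∈ rest.map Prod.fst := List.mem_map_of_mem hp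
    simp only [Function.comp_apply]
    rw [htail p.1 hk']

-- the grouping fold's items are B's dedup-the-keys-then-filter pipeline
theorem pv_main (rows : List (String × String)) :
    (rows.foldl pvStep PySem.Dict.empty).items
      = (PySem.List.dedup (rows.map Prod.fst)).map
          (fun sid => (sid, PySem.Set.ofList ((rows.filter (fun p => p.1 == sid)).map Prod.snd))) := by
  set G := rows.foldl pvStep PySem.Dict.empty with hG
  have hkeys : G.keys = PySem.Set.ofList (rows.map Prod.fst) := by
    rw [hG]
    have := PySem.Dict.keys_foldl_modify_key rows (fun p => p.1)
      PySem.Set.empty (fun _ p s => PySem.Set.add s p.2) PySem.Dict.empty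
    simpa [pvStep, PySem.Set.update_empty] using this
  have hnd : G.keys.Nodup := by
    rw [hG]
    exact PySem.Dict.nodup_keys_foldl_modify_key rows (fun p => p.1)
      PySem.Set.empty (fun _ p s => PySem.Set.add s p.2) PySem.Dict.empty (by simp)
  have hitems : G.items = (G.items.map Prod.fst).map
      (fun k => (k, (PySem.Dict.mk G.items).getD k PySem.Set.empty)) :=
    pv_assoc_items G.items hnd
  have hmk : PySem.Dict.mk G.items = G := rfl
  rw [hmk] at hitems
  have hkeys' : G.items.map Prod.fst = G.keys := rfl
  rw [hkeys'] at hitems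
  rw [hitems, hkeys, PySem.List.dedup_eq_ofList]
  refine List.map_congr_left (fun k _ => ?_)
  have h := pv_getD_fold rows PySem.Dict.empty k
  rw [hG, h]
  exact congrArg (fun s => (k, s)) (PySem.Set.update_empty ((rows.filter (fun p : String × String => p.1 == k)).map Prod.snd))

-- ===== VERDICT (by name: the statement is the Claim_ definition above) =====
theorem issue_codes_by_slide_py_spec : Claim_equal_issue_codes_by_slide_py := by
  intro issues _
  show issue_codes_by_slide_py issues = issue_codes_by_slide_py_alt issues
  have h1 : issue_codes_by_slide_py issues = ((pvRows issues).foldl pvStep PySem.Dict.empty).items :=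
    congrArg PySem.Dict.items (pv_foldA_eq issues PySem.Dict.empty)
  exact h1.trans ((pv_main (pvRows issues)).trans rfl)
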